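-- pv_equiv track=rewrite | github.com/anamta-ansari/Hackathon-0-Personal-AI-Employee-silver-Tier | ai-employee/src/skills/gmail_watcher_skill.py | _generate_suggested_actions
-- ===== SOURCE A (Python) =====
-- from typing import List, Dict, Any, Optional, Set
--
-- def _generate_suggested_actions(
--
--     from_email: str,
--     subject: str,
--     snippet: str,
--     body: str
-- ) -> List[str]:
--     """
--     Generate suggested actions based on email content
--
--     Args:
--         from_email: Sender email
--         subject: Email subject
--         snippet: Email snippet
--         body: Full email body
--
--     Returns:
--         List[str]: Suggested actions
--     """
--     actions = []
--     text = f"{subject} {snippet} {body}".lower()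
--
--     # Payment/Invoice related
--     if any(word in text for word in ['invoice', 'payment', 'bill', 'receipt', 'billing']):
--         actions.append("Review and process payment/invoice")
--         actions.append("Forward to accounting if needed")
--         actions.append("Verify amount and due date")
--
--     # Urgent items
--     if any(word in text for word in ['urgent', 'asap', 'emergency', 'immediate', 'critical']):
--         actions.append("Handle with high priority")
--         actions.append("Reply within 2 hours")
--
--     # Meeting/Scheduling
--     if any(word in text for word in ['meeting', 'schedule', 'calendar', 'appointment', 'invite']):
--         actions.append("Check calendar availability")
--         actions.append("Respond with available times")
--         actions.append("Add to calendar if confirmed")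
--
--     # Questions/Support
--     if any(word in text for word in ['question', 'help', 'support', 'issue', 'problem']):
--         actions.append("Provide assistance or clarification")
--         actions.append("Escalate if beyond scope")
--
--     # Business/Sales
--     if any(word in text for word in ['proposal', 'quote', 'estimate', 'contract', 'agreement']):
--         actions.append("Review terms and conditions")
--         actions.append("Prepare response or counter-proposal")
--
--     # Newsletters/Promotional
--     if any(word in text for word in ['newsletter', 'unsubscribe', 'promotion', 'offer']):
--         actions.append("Review - may be promotional")
--         actions.append("Consider unsubscribing if not needed")
--
--     # Default actions
--     if not actions:
--         actions.append("Read and respond as needed")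
--
--     # Always add archive action
--     actions.append("Archive after processing")
--
--     return actions
-- ===== SOURCE B (Python) =====
-- from typing import List
--
-- # B: inverted keyword->category index plus a single positional scan of the text.
-- # Instead of running a substring search per category keyword, B walks the text
-- # once position by position, records which categories have a keyword starting
-- # there (a matched set), and afterwards emits each matched category's actions
-- # in category order.
--
-- _RULE_ACTIONS = [
--     ["Review and process payment/invoice",
--      "Forward to accounting if needed",
--      "Verify amount and due date"],
--     ["Handle with high priority",
--      "Reply within 2 hours"],
--     ["Check calendar availability",
--      "Respond with available times",
--      "Add to calendar if confirmed"],
--     ["Provide assistance or clarification",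
--      "Escalate if beyond scope"],
--     ["Review terms and conditions",
--      "Prepare response or counter-proposal"],
--     ["Review - may be promotional",
--      "Consider unsubscribing if not needed"],
-- ]
--
-- _KEYWORD_RULE = {kw: idx for idx, kws in enumerate([
--     ['invoice', 'payment', 'bill', 'receipt', 'billing'],
--     ['urgent', 'asap', 'emergency', 'immediate', 'critical'],
--     ['meeting', 'schedule', 'calendar', 'appointment', 'invite'],
--     ['question', 'help', 'support', 'issue', 'problem'],
--     ['proposal', 'quote', 'estimate', 'contract', 'agreement'],
--     ['newsletter', 'unsubscribe', 'promotion', 'offer'],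
-- ]) for kw in kws}
--
--
-- # bucket the inverted index by first character so each scanned position only
-- # tests the few keywords that could start there
-- _KW_BUCKETS = {}
-- for _kw, _idx in _KEYWORD_RULE.items():
--     _KW_BUCKETS.setdefault(_kw[0], []).append((_kw, _idx))
--
--
-- def _generate_suggested_actions(from_email: str, subject: str, snippet: str, body: str) -> List[str]:
--     text = f"{subject} {snippet} {body}".lower()
--     matched = set()
--     for i in range(len(text)):
--         for kw, idx in _KW_BUCKETS.get(text[i], ()):
--             if idx not in matched and text.startswith(kw, i):
--                 matched.add(idx)
--     actions = [a for idx in range(len(_RULE_ACTIONS)) if idx in matched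
--                for a in _RULE_ACTIONS[idx]]
--     if not actions:
--         actions.append("Read and respond as needed")
--     actions.append("Archive after processing")
--     return actions
-- ===== Notes on version B (the rewrite author's own statement) =====
-- stated objective: alternative
-- what changed: Replaces A's six per-category any-substring checks with an inverted keyword-to-category index bucketed by first character and a single positional scan of the text that collects a matched-category set, followed by one emit pass over the categories.
import Mathlib
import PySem

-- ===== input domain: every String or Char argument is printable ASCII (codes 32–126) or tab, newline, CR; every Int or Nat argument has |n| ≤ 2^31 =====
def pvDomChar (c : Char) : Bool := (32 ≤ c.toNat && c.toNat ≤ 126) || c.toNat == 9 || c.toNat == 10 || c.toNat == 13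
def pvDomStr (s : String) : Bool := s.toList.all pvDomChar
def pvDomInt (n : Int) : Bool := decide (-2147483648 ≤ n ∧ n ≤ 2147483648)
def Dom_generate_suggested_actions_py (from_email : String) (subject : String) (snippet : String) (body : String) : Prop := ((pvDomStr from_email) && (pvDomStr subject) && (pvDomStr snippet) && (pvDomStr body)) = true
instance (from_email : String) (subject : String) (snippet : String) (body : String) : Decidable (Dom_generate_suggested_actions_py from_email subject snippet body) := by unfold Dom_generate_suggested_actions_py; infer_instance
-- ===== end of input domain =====

-- B replaces A's per-category substring checks with an inverted keyword->category index and one positional scan of the text collecting a matched-category set (objective: alternative).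


-- ===== PORT A =====
def generate_suggested_actions_py (from_email : String) (subject : String) (snippet : String) (body : String) : List String :=
  -- text = f"{subject} {snippet} {body}".lower()  (concatenation done on code-point lists; exact)
  let text := PySem.Chars.lower (subject.toList ++ ' ' :: snippet.toList ++ ' ' :: body.toList)
  let actions : List String := []
  let actions := if ["invoice", "payment", "bill", "receipt", "billing"].any
      (fun w => PySem.Chars.isIn w.toList text) then
    actions ++ ["Review and process payment/invoice", "Forward to accounting if needed",
      "Verify amount and due date"] else actions
  let actions := if ["urgent", "asap", "emergency", "immediate", "critical"].any
      (fun w => PySem.Chars.isIn w.toList text) then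
    actions ++ ["Handle with high priority", "Reply within 2 hours"] else actions
  let actions := if ["meeting", "schedule", "calendar", "appointment", "invite"].any
      (fun w => PySem.Chars.isIn w.toList text) then
    actions ++ ["Check calendar availability", "Respond with available times",
      "Add to calendar if confirmed"] else actions
  let actions := if ["question", "help", "support", "issue", "problem"].any
      (fun w => PySem.Chars.isIn w.toList text) then
    actions ++ ["Provide assistance or clarification", "Escalate if beyond scope"] else actions
  let actions := if ["proposal", "quote", "estimate", "contract", "agreement"].any
      (fun w => PySem.Chars.isIn w.toList text) then
    actions ++ ["Review terms and conditions", "Prepare response or counter-proposal"] else actions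
  let actions := if ["newsletter", "unsubscribe", "promotion", "offer"].any
      (fun w => PySem.Chars.isIn w.toList text) then
    actions ++ ["Review - may be promotional", "Consider unsubscribing if not needed"] else actions
  let actions := if actions.isEmpty then actions ++ ["Read and respond as needed"] else actions
  actions ++ ["Archive after processing"]

-- ===== PORT B =====
-- B's per-category action table _RULE_ACTIONS
def pvRuleActions : List (List String) :=
  [ ["Review and process payment/invoice", "Forward to accounting if needed",
     "Verify amount and due date"],
    ["Handle with high priority", "Reply within 2 hours"],
    ["Check calendar availability", "Respond with available times",
     "Add to calendar if confirmed"],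
    ["Provide assistance or clarification", "Escalate if beyond scope"],
    ["Review terms and conditions", "Prepare response or counter-proposal"],
    ["Review - may be promotional", "Consider unsubscribing if not needed"] ]

-- B's _KW_BUCKETS: the inverted index grouped by first character (a dict, insertion order)
def pvBuckets : PySem.Dict Char (List (List Char × Nat)) :=
  ⟨[ ('i', [("invoice".toList, 0), ("immediate".toList, 1), ("invite".toList, 2), ("issue".toList, 3)]),
    ('p', [("payment".toList, 0), ("problem".toList, 3), ("proposal".toList, 4), ("promotion".toList, 5)]),
    ('b', [("bill".toList, 0), ("billing".toList, 0)]),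
    ('r', [("receipt".toList, 0)]),
    ('u', [("urgent".toList, 1), ("unsubscribe".toList, 5)]),
    ('a', [("asap".toList, 1), ("appointment".toList, 2), ("agreement".toList, 4)]),
    ('e', [("emergency".toList, 1), ("estimate".toList, 4)]),
    ('c', [("critical".toList, 1), ("calendar".toList, 2), ("contract".toList, 4)]),
    ('m', [("meeting".toList, 2)]),
    ('s', [("schedule".toList, 2), ("support".toList, 3)]),
    ('q', [("question".toList, 3), ("quote".toList, 4)]),
    ('h', [("help".toList, 3)]),
    ('n', [("newsletter".toList, 5)]),
    ('o', [("offer".toList, 5)]) ]⟩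

def generate_suggested_actions_py_alt (from_email : String) (subject : String) (snippet : String) (body : String) : List String :=
  let text := PySem.Chars.lower (subject.toList ++ ' ' :: snippet.toList ++ ' ' :: body.toList)
  -- one scan over positions i of the text; 'text.startswith(kw, i)' with 0 ≤ i is exactly a prefix test on text.drop i
  let matched : PySem.Set Nat :=
    (List.range text.length).foldl (fun m i =>
      (PySem.Dict.getD pvBuckets (PySem.List.pyGetD text ((i : Nat) : Int) ' ') []).foldl (fun m kr =>
        if !(PySem.Set.contains m kr.2) && PySem.Chars.startswith (text.drop i) kr.1
        then PySem.Set.add m kr.2 else m) m) PySem.Set.empty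
  -- [a for idx in range(len(_RULE_ACTIONS)) if idx in matched for a in _RULE_ACTIONS[idx]]
  let actions : List String :=
    (List.range pvRuleActions.length).foldl (fun acc idx =>
      if PySem.Set.contains matched idx then acc ++ pvRuleActions.getD idx [] else acc) []
  let actions := if actions.isEmpty then actions ++ ["Read and respond as needed"] else actions
  actions ++ ["Archive after processing"]

-- ===== PRECONDITION & SPEC =====
def Spec_generate_suggested_actions_py (from_email : String) (subject : String) (snippet : String) (body : String) (out : List String) : Prop := out = generate_suggested_actions_py_alt from_email subject snippet body
instance (from_email : String) (subject : String) (snippet : String) (body : String) (out : List String) : Decidable (Spec_generate_suggested_actions_py from_email subject snippet body out) := by unfold Spec_generate_suggested_actions_py; infer_instance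

-- ===== CLAIM =====
def Claim_equal_generate_suggested_actions_py : Prop := ∀ (from_email : String) (subject : String) (snippet : String) (body : String), Dom_generate_suggested_actions_py from_email subject snippet body → Spec_generate_suggested_actions_py from_email subject snippet body (generate_suggested_actions_py from_email subject snippet body)

-- ===== LEMMAS AND PROOFS =====

-- the flat inverted index (keyword, category) used only by the proofs to characterise the scan
def pvKwRule : List (List Char × Nat) :=
  [ ("invoice".toList, 0), ("payment".toList, 0), ("bill".toList, 0), ("receipt".toList, 0), ("billing".toList, 0),
    ("urgent".toList, 1), ("asap".toList, 1), ("emergency".toList, 1), ("immediate".toList, 1), ("critical".toList, 1),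
    ("meeting".toList, 2), ("schedule".toList, 2), ("calendar".toList, 2), ("appointment".toList, 2), ("invite".toList, 2),
    ("question".toList, 3), ("help".toList, 3), ("support".toList, 3), ("issue".toList, 3), ("problem".toList, 3),
    ("proposal".toList, 4), ("quote".toList, 4), ("estimate".toList, 4), ("contract".toList, 4), ("agreement".toList, 4),
    ("newsletter".toList, 5), ("unsubscribe".toList, 5), ("promotion".toList, 5), ("offer".toList, 5) ]


-- helper names for the two bodies once the lowered text is abstracted out
def pvText (subject : String) (snippet : String) (body : String) : List Char :=
  PySem.Chars.lower (subject.toList ++ ' ' :: snippet.toList ++ ' ' :: body.toList)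

def pvScan (t : List Char) : PySem.Set Nat :=
  (List.range t.length).foldl (fun m i =>
    (PySem.Dict.getD pvBuckets (PySem.List.pyGetD t ((i : Nat) : Int) ' ') []).foldl (fun m kr =>
      if !(PySem.Set.contains m kr.2) && PySem.Chars.startswith (t.drop i) kr.1
      then PySem.Set.add m kr.2 else m) m) PySem.Set.empty

def pvEmit (matched : PySem.Set Nat) : List String :=
  (List.range pvRuleActions.length).foldl (fun acc idx =>
    if PySem.Set.contains matched idx then acc ++ pvRuleActions.getD idx [] else acc) []

def pvA (text : List Char) : List String :=
  let actions : List String := []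
  let actions := if ["invoice", "payment", "bill", "receipt", "billing"].any
      (fun w => PySem.Chars.isIn w.toList text) then
    actions ++ ["Review and process payment/invoice", "Forward to accounting if needed",
      "Verify amount and due date"] else actions
  let actions := if ["urgent", "asap", "emergency", "immediate", "critical"].any
      (fun w => PySem.Chars.isIn w.toList text) then
    actions ++ ["Handle with high priority", "Reply within 2 hours"] else actions
  let actions := if ["meeting", "schedule", "calendar", "appointment", "invite"].any
      (fun w => PySem.Chars.isIn w.toList text) then
    actions ++ ["Check calendar availability", "Respond with available times",
      "Add to calendar if confirmed"] else actions
  let actions := if ["question", "help", "support", "issue", "problem"].any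
      (fun w => PySem.Chars.isIn w.toList text) then
    actions ++ ["Provide assistance or clarification", "Escalate if beyond scope"] else actions
  let actions := if ["proposal", "quote", "estimate", "contract", "agreement"].any
      (fun w => PySem.Chars.isIn w.toList text) then
    actions ++ ["Review terms and conditions", "Prepare response or counter-proposal"] else actions
  let actions := if ["newsletter", "unsubscribe", "promotion", "offer"].any
      (fun w => PySem.Chars.isIn w.toList text) then
    actions ++ ["Review - may be promotional", "Consider unsubscribing if not needed"] else actions
  let actions := if actions.isEmpty then actions ++ ["Read and respond as needed"] else actions
  actions ++ ["Archive after processing"]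

def pvB (text : List Char) : List String :=
  let actions := pvEmit (pvScan text)
  let actions := if actions.isEmpty then actions ++ ["Read and respond as needed"] else actions
  actions ++ ["Archive after processing"]

-- membership after the inner (per-position) fold over the keyword table
theorem pv_inner_mem (t : List Char) (krs : List (List Char × Nat)) (m : PySem.Set Nat) (j : Nat) :
    (j ∈ krs.foldl (fun m kr =>
        if !(PySem.Set.contains m kr.2) && PySem.Chars.startswith t kr.1
        then PySem.Set.add m kr.2 else m) m)
    ↔ j ∈ m ∨ ∃ kr ∈ krs, kr.2 = j ∧ PySem.Chars.startswith t kr.1 = true := by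
  induction krs generalizing m with
  | nil => simp
  | cons kr krs ih =>
    simp only [List.foldl_cons]
    rw [ih]
    constructor
    · rintro (h | ⟨kr', hk, hj, hs⟩)
      · split_ifs at h with hc
        · rcases (PySem.Set.mem_add m kr.2 j).mp h with h' | h'
          · exact Or.inl h'
          · simp only [Bool.and_eq_true] at hc
            exact Or.inr ⟨kr, List.mem_cons.mpr (Or.inl rfl), h'.symm, hc.2⟩
        · exact Or.inl h
      · exact Or.inr ⟨kr', List.mem_cons.mpr (Or.inr hk), hj, hs⟩
    · rintro (h | ⟨kr', hk, hj, hs⟩)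
      · split_ifs with hc
        · exact Or.inl ((PySem.Set.mem_add m kr.2 j).mpr (Or.inl h))
        · exact Or.inl h
      · rcases List.mem_cons.mp hk with heq | hk'
        · subst heq
          split_ifs with hc
          · exact Or.inl ((PySem.Set.mem_add m kr'.2 j).mpr (Or.inr hj.symm))
          · have hmem : kr'.2 ∈ m := by
              by_contra hno
              exact hc (by simp [hs]; exact hno)
            exact Or.inl (hj ▸ hmem)
        · exact Or.inr ⟨kr', hk', hj, hs⟩

-- membership after the full positional scan
theorem pv_outer_mem (t : List Char) (l : List Nat) (m : PySem.Set Nat) (j : Nat) :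
    (j ∈ l.foldl (fun m i =>
        (PySem.Dict.getD pvBuckets (PySem.List.pyGetD t ((i : Nat) : Int) ' ') []).foldl (fun m kr =>
          if !(PySem.Set.contains m kr.2) && PySem.Chars.startswith (t.drop i) kr.1
          then PySem.Set.add m kr.2 else m) m) m)
    ↔ j ∈ m ∨ ∃ i ∈ l, ∃ kr ∈ PySem.Dict.getD pvBuckets (PySem.List.pyGetD t ((i : Nat) : Int) ' ') [],
        kr.2 = j ∧ PySem.Chars.startswith (t.drop i) kr.1 = true := by
  induction l generalizing m with
  | nil => simp
  | cons i l ih =>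
    simp only [List.foldl_cons, List.mem_cons, ih, pv_inner_mem]
    constructor
    · rintro ((h | ⟨kr, hk, hj, hs⟩) | ⟨i', hi', rest⟩)
      · exact Or.inl h
      · exact Or.inr ⟨i, Or.inl rfl, kr, hk, hj, hs⟩
      · exact Or.inr ⟨i', Or.inr hi', rest⟩
    · rintro (h | ⟨i', rfl | hi', rest⟩)
      · exact Or.inl (Or.inl h)
      · exact Or.inl (Or.inr rest)
      · exact Or.inr ⟨i', hi', rest⟩

-- a nonempty keyword starts at some scanned position iff it is a substring
theorem pv_scan_isIn (t kw : List Char) (hkw : kw ≠ []) :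
    (∃ i ∈ List.range t.length, PySem.Chars.startswith (t.drop i) kw = true)
    ↔ PySem.Chars.isIn kw t = true := by
  rw [← PySem.Chars.exists_prefix_drop_iff_isIn]
  constructor
  · rintro ⟨i, _, h⟩
    exact ⟨i, (PySem.Chars.startswith_iff _ _).mp h⟩
  · rintro ⟨i, h⟩
    have hi : i < t.length := by
      by_contra hge
      rw [List.drop_eq_nil_of_le (by omega)] at h
      exact hkw (List.prefix_nil.mp h)
    exact ⟨i, List.mem_range.mpr hi, (PySem.Chars.startswith_iff _ _).mpr h⟩

-- every bucket entry is an entry of the inverted index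
theorem pv_bucket_sub (c : Char) (kr : List Char × Nat)
    (h : kr ∈ PySem.Dict.getD pvBuckets c []) : kr ∈ pvKwRule := by
  rw [PySem.Dict.getD_eq_get?_getD] at h
  cases hg : PySem.Dict.get? pvBuckets c with
  | none => rw [hg] at h; exact absurd h (List.not_mem_nil)
  | some l =>
    rw [hg] at h
    simp only [Option.getD_some] at h
    have hl : (c, l) ∈ pvBuckets.items := PySem.Dict.mem_items_of_get?_eq_some _ hg
    simp only [pvBuckets, List.mem_cons, List.not_mem_nil, or_false,
      Prod.mk.injEq] at hl
    rcases hl with ⟨-, rfl⟩ | ⟨-, rfl⟩ | ⟨-, rfl⟩ | ⟨-, rfl⟩ | ⟨-, rfl⟩ | ⟨-, rfl⟩ | ⟨-, rfl⟩ |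
      ⟨-, rfl⟩ | ⟨-, rfl⟩ | ⟨-, rfl⟩ | ⟨-, rfl⟩ | ⟨-, rfl⟩ | ⟨-, rfl⟩ | ⟨-, rfl⟩ <;>
      revert h <;>
      exact fun h => (by decide : ∀ x ∈ _, x ∈ pvKwRule) kr h

-- a keyword prefixed at a valid position determines the scanned character
theorem pv_head_of_prefix (t : List Char) (i : Nat) (kw : List Char) (hne : kw ≠ [])
    (h : kw <+: t.drop i) : t[i]? = kw.head? := by
  obtain ⟨u, hu⟩ := h
  rw [← List.head?_drop, ← hu]
  cases kw with
  | nil => exact absurd rfl hne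
  | cons c kw => rfl

-- an inverted-index entry whose keyword starts at position i lies in position i's bucket
theorem pv_bucket_mem (t : List Char) (i : Nat) (kr : List Char × Nat)
    (hk : kr ∈ pvKwRule) (hs : PySem.Chars.startswith (t.drop i) kr.1 = true) :
    kr ∈ PySem.Dict.getD pvBuckets (PySem.List.pyGetD t ((i : Nat) : Int) ' ') [] := by
  rw [PySem.Chars.startswith_iff] at hs
  rw [PySem.List.pyGetD_natCast, List.getD_eq_getElem?_getD]
  fin_cases hk <;>
    rw [pv_head_of_prefix t i _ (by decide) hs] <;> decide

theorem pv_contains_scan (t : List Char) (j : Nat) :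
    PySem.Set.contains (pvScan t) j = true
    ↔ ∃ kr ∈ pvKwRule, kr.2 = j ∧ PySem.Chars.isIn kr.1 t = true := by
  rw [PySem.Set.contains_iff]
  unfold pvScan
  rw [pv_outer_mem]
  have hne : ∀ kr ∈ pvKwRule, kr.1 ≠ [] := by decide
  constructor
  · rintro (h | ⟨i, hi, kr, hkb, hj, hs⟩)
    · simp [PySem.Set.empty] at h
    · have hk := pv_bucket_sub _ kr hkb
      exact ⟨kr, hk, hj, (pv_scan_isIn t kr.1 (hne kr hk)).mp ⟨i, hi, hs⟩⟩
  · rintro ⟨kr, hk, hj, hin⟩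
    obtain ⟨i, hi, hs⟩ := (pv_scan_isIn t kr.1 (hne kr hk)).mpr hin
    exact Or.inr ⟨i, hi, kr, pv_bucket_mem t i kr hk hs, hj, hs⟩

set_option maxHeartbeats 1000000 in
theorem pvAB (t : List Char) : pvA t = pvB t := by
  have h0 : PySem.Set.contains (pvScan t) 0
      = (["invoice", "payment", "bill", "receipt", "billing"].any
          (fun w => PySem.Chars.isIn w.toList t)) := by
    rw [Bool.eq_iff_iff, pv_contains_scan]
    simp [pvKwRule]
  have h1 : PySem.Set.contains (pvScan t) 1
      = (["urgent", "asap", "emergency", "immediate", "critical"].any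
          (fun w => PySem.Chars.isIn w.toList t)) := by
    rw [Bool.eq_iff_iff, pv_contains_scan]
    simp [pvKwRule]
  have h2 : PySem.Set.contains (pvScan t) 2
      = (["meeting", "schedule", "calendar", "appointment", "invite"].any
          (fun w => PySem.Chars.isIn w.toList t)) := by
    rw [Bool.eq_iff_iff, pv_contains_scan]
    simp [pvKwRule]
  have h3 : PySem.Set.contains (pvScan t) 3
      = (["question", "help", "support", "issue", "problem"].any
          (fun w => PySem.Chars.isIn w.toList t)) := by
    rw [Bool.eq_iff_iff, pv_contains_scan]
    simp [pvKwRule]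
  have h4 : PySem.Set.contains (pvScan t) 4
      = (["proposal", "quote", "estimate", "contract", "agreement"].any
          (fun w => PySem.Chars.isIn w.toList t)) := by
    rw [Bool.eq_iff_iff, pv_contains_scan]
    simp [pvKwRule]
  have h5 : PySem.Set.contains (pvScan t) 5
      = (["newsletter", "unsubscribe", "promotion", "offer"].any
          (fun w => PySem.Chars.isIn w.toList t)) := by
    rw [Bool.eq_iff_iff, pv_contains_scan]
    simp [pvKwRule]
  unfold pvA pvB pvEmit
  rw [show List.range pvRuleActions.length = [0, 1, 2, 3, 4, 5] from rfl]
  simp only [List.foldl_cons, List.foldl_nil]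
  rw [h0, h1, h2, h3, h4, h5]
  clear h0 h1 h2 h3 h4 h5
  rw [show pvRuleActions.getD 0 [] = ["Review and process payment/invoice",
        "Forward to accounting if needed", "Verify amount and due date"] from rfl,
      show pvRuleActions.getD 1 [] = ["Handle with high priority", "Reply within 2 hours"] from rfl,
      show pvRuleActions.getD 2 [] = ["Check calendar availability", "Respond with available times",
        "Add to calendar if confirmed"] from rfl,
      show pvRuleActions.getD 3 [] = ["Provide assistance or clarification",
        "Escalate if beyond scope"] from rfl,
      show pvRuleActions.getD 4 [] = ["Review terms and conditions",
        "Prepare response or counter-proposal"] from rfl,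
      show pvRuleActions.getD 5 [] = ["Review - may be promotional",
        "Consider unsubscribing if not needed"] from rfl]

-- ===== VERDICT =====
theorem generate_suggested_actions_py_spec : Claim_equal_generate_suggested_actions_py := by
  intro fe s sn b _
  unfold Spec_generate_suggested_actions_py
  rw [show generate_suggested_actions_py fe s sn b = pvA (pvText s sn b) from rfl,
      show generate_suggested_actions_py_alt fe s sn b = pvB (pvText s sn b) from rfl]
  exact pvAB (pvText s sn b)
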